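-- pv_equiv track=rewrite | github.com/ziaontheotherside/school-projects | MetroLines/metro_lines.py | form_path
-- ===== SOURCE A (Python) =====
-- def form_path(soln, stations):
--     path = ''
--     initial_line = None
--
--     for i in range(len(soln) - 1):
--         current_node = soln[i]
--         next_node = soln[i + 1]
--         current_line = stations[current_node][next_node]
--
--         if initial_line is None:
--             initial_line = current_line
--             path += f"Start on the line {current_line} --> {current_node}"
--         elif current_line != initial_line:
--             path += f" --> At {current_node} transfer from the {initial_line} line to {current_line} line"
--             initial_line = current_line
--         else:
--             path += f" --> {current_node}"
--     path += f" --> {soln[-1]}"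
--     return path
-- ===== SOURCE B (Python) =====
-- def group_runs(edges):
--     """Group consecutive edges (src, line) into maximal runs of equal line."""
--     if not edges:
--         return []
--     (src, line) = edges[0]
--     rest = group_runs(edges[1:])
--     if rest and rest[0][0] == line:
--         return [(line, [src] + rest[0][1])] + rest[1:]
--     return [(line, [src])] + rest
--
--
-- def render_runs(prev_line, runs):
--     """Render every run after the first: a transfer clause, then its remaining sources."""
--     if not runs:
--         return []
--     (line, srcs) = runs[0]
--     head = f" --> At {srcs[0]} transfer from the {prev_line} line to {line} line"
--     return [head] + [f" --> {s}" for s in srcs[1:]] + render_runs(line, runs[1:])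
--
--
-- def form_path(soln, stations):
--     edges = [(a, stations[a][b]) for a, b in zip(soln, soln[1:])]
--     runs = group_runs(edges)
--     if runs:
--         (line, srcs) = runs[0]
--         parts = [f"Start on the line {line} --> {srcs[0]}"] \
--             + [f" --> {s}" for s in srcs[1:]] + render_runs(line, runs[1:])
--     else:
--         parts = []
--     return "".join(parts) + f" --> {soln[-1]}"
-- ===== Notes on version B (the rewrite author's own statement) =====
-- stated objective: alternative
-- what changed: Replaces A's single-pass change-detection state machine (path string + mutable initial_line) by a two-phase pass: build the (source, line) edge list, group it into maximal runs of equal line by structural recursion, then format the runs (first run, then transfer clauses between consecutive runs) and join the parts.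
import Mathlib
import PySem

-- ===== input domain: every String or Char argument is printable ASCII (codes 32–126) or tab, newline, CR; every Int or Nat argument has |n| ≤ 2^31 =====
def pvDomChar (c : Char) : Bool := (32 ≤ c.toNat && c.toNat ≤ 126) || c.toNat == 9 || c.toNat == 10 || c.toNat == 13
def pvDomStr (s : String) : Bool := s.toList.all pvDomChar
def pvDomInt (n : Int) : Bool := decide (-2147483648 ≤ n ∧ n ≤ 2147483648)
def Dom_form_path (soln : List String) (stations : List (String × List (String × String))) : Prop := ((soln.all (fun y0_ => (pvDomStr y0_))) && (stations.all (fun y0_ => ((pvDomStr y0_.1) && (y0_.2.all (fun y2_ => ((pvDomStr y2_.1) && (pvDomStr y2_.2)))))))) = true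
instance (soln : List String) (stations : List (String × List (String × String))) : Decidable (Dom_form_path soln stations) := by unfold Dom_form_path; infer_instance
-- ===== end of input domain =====

-- B replaces A's one-pass transfer-detection state machine by a group-then-format pass
-- (edge list → maximal runs of equal line → formatted parts joined); same cost, different decomposition.


-- ===== PORT A =====
-- stations[a][b] as an Option (none = KeyError, excluded by Pre_); shared by both ports.
def pvLook (stations : List (String × List (String × String))) (a b : String) : Option String :=
  match (PySem.Dict.mk stations).get? a with
  | none => none
  | some inner => (PySem.Dict.mk inner).get? b

-- total form used by the ports (Pre_ guarantees the lookup succeeds)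
def pvLookD (stations : List (String × List (String × String))) (a b : String) : String :=
  (pvLook stations a b).getD ""

-- one iteration of A's loop: state = (path, initial_line)
def pvStepA (stations : List (String × List (String × String))) (soln : List String)
    (st : String × Option String) (i : Int) : String × Option String :=
  let current_node := PySem.List.pyGetD soln i ""
  let next_node := PySem.List.pyGetD soln (i + 1) ""
  let current_line := pvLookD stations current_node next_node
  match st.2 with
  | none => (st.1 ++ "Start on the line " ++ current_line ++ " --> " ++ current_node, some current_line)
  | some initial_line =>
    if current_line ≠ initial_line then
      (st.1 ++ " --> At " ++ current_node ++ " transfer from the " ++ initial_line ++ " line to " ++ current_line ++ " line", some current_line)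
    else
      (st.1 ++ " --> " ++ current_node, some initial_line)

def form_path (soln : List String) (stations : List (String × List (String × String))) : String :=
  let st := (PySem.List.pyRange 0 (PySem.List.len soln - 1) 1).foldl (pvStepA stations soln) ("", none)
  st.1 ++ " --> " ++ PySem.List.pyGetD soln (-1) ""

-- ===== PORT B =====
-- edges = [(a, stations[a][b]) for a, b in zip(soln, soln[1:])]
def pvEdges (soln : List String) (stations : List (String × List (String × String))) : List (String × String) :=
  (soln.zip (PySem.List.slice soln (some 1) none)).map (fun p => (p.1, pvLookD stations p.1 p.2))

-- group_runs: maximal runs of equal line, by structural recursion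
def pvGroupRuns : List (String × String) → List (String × List String)
  | [] => []
  | (src, line) :: rest =>
    match pvGroupRuns rest with
    | [] => [(line, [src])]
    | (l', ss) :: rs => if line = l' then (line, src :: ss) :: rs else (line, [src]) :: (l', ss) :: rs

def pvCont (s : String) : String := " --> " ++ s

-- render_runs: every run after the first
def pvRenderRuns : String → List (String × List String) → List String
  | _, [] => []
  | prev, (line, srcs) :: rs =>
    (" --> At " ++ srcs.headD "" ++ " transfer from the " ++ prev ++ " line to " ++ line ++ " line")
      :: (srcs.tail.map pvCont ++ pvRenderRuns line rs)

def pvParts : List (String × List String) → List String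
  | [] => []
  | (line, srcs) :: rs =>
    ("Start on the line " ++ line ++ " --> " ++ srcs.headD "")
      :: (srcs.tail.map pvCont ++ pvRenderRuns line rs)

def form_path_alt (soln : List String) (stations : List (String × List (String × String))) : String :=
  PySem.Str.join "" (pvParts (pvGroupRuns (pvEdges soln stations)))
    ++ " --> " ++ PySem.List.pyGetD soln (-1) ""

-- ===== PRECONDITION & SPEC =====
-- Pre_ excludes exactly where Python A raises: empty soln (IndexError on soln[-1]) and a missing
-- station/neighbour key on a consecutive pair (KeyError); B raises on the same inputs.
def Pre_form_path (soln : List String) (stations : List (String × List (String × String))) : Prop :=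
  soln ≠ [] ∧ ∀ p ∈ soln.zip soln.tail,
    (((stations.lookup p.1).bind (fun inner => inner.lookup p.2)).isSome : Prop)
instance (soln : List String) (stations : List (String × List (String × String))) : Decidable (Pre_form_path soln stations) := by unfold Pre_form_path; infer_instance

def pvWitness_form_path : List String × (List (String × List (String × String))) :=
  (["a", "b", "c"], [("a", [("b", "L1")]), ("b", [("c", "L2")])])

def Spec_form_path (soln : List String) (stations : List (String × List (String × String))) (out : String) : Prop := out = form_path_alt soln stations
instance (soln : List String) (stations : List (String × List (String × String))) (out : String) : Decidable (Spec_form_path soln stations out) := by unfold Spec_form_path; infer_instance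

-- ===== CLAIM (what is proved, stated in full; the proofs are below) =====
def Claim_equal_form_path : Prop := ∀ (soln : List String) (stations : List (String × List (String × String))), Dom_form_path soln stations → Pre_form_path soln stations → Spec_form_path soln stations (form_path soln stations)

-- ===== LEMMAS AND PROOFS =====

-- A's step, expressed on an already-built edge (source node, line)
def pvStepE (st : String × Option String) (e : String × String) : String × Option String :=
  match st.2 with
  | none => (st.1 ++ "Start on the line " ++ e.2 ++ " --> " ++ e.1, some e.2)
  | some initial_line =>
    if e.2 ≠ initial_line then
      (st.1 ++ " --> At " ++ e.1 ++ " transfer from the " ++ initial_line ++ " line to " ++ e.2 ++ " line", some e.2)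
    else
      (st.1 ++ " --> " ++ e.1, some initial_line)

-- what A appends after the first edge, given the current line
def pvRenderRest (L : String) : List (String × String) → String
  | [] => ""
  | (s, l) :: rest =>
    (if l ≠ L then " --> At " ++ s ++ " transfer from the " ++ L ++ " line to " ++ l ++ " line"
     else " --> " ++ s) ++ pvRenderRest l rest

theorem pv_zip_index : ∀ (xs : List String),
    (List.range (xs.length - 1)).map (fun k => (xs.getD k "", xs.getD (k + 1) "")) = xs.zip xs.tail
  | [] => by simp
  | [x] => by simp
  | x :: y :: t => by
    have ih := pv_zip_index (y :: t)
    simp only [List.length_cons, Nat.add_sub_cancel] at ih ⊢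
    rw [List.range_succ_eq_map, List.map_cons, List.map_map]
    have hmap : (fun k => ((x :: y :: t).getD k "", (x :: y :: t).getD (k + 1) "")) ∘ Nat.succ
        = fun k => ((y :: t).getD k "", (y :: t).getD (k + 1) "") := by
      funext k
      simp [Function.comp, Nat.succ_eq_add_one]
    rw [hmap, ih]
    simp [List.zip]

theorem pv_formA_eq (soln : List String) (stations : List (String × List (String × String))) :
    form_path soln stations =
      (((soln.zip soln.tail).map (fun p => (p.1, pvLookD stations p.1 p.2))).foldl pvStepE ("", none)).1
        ++ " --> " ++ PySem.List.pyGetD soln (-1) "" := by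
  unfold form_path
  have hn : ((PySem.List.len soln - 1 - 0)).toNat = soln.length - 1 := by
    rw [PySem.List.len_eq]; omega
  rw [PySem.List.pyRange_one, hn, List.foldl_map]
  simp only [zero_add]
  have key : ∀ (l : List Nat) (init : String × Option String),
      l.foldl (fun st (k : Nat) => pvStepA stations soln st (k : Int)) init
        = (l.map (fun k => (soln.getD k "", soln.getD (k + 1) ""))).foldl
            (fun st p => pvStepE st (p.1, pvLookD stations p.1 p.2)) init := by
    intro l
    induction l with
    | nil => intro init; rfl
    | cons a l ihl =>
      intro init
      rw [List.foldl_cons, List.map_cons, List.foldl_cons, ihl]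
      congr 1
      have h2 : ((a : Int) + 1) = (((a + 1 : Nat)) : Int) := by omega
      unfold pvStepA pvStepE
      rw [h2, PySem.List.pyGetD_natCast, PySem.List.pyGetD_natCast]
  rw [key, pv_zip_index]
  simp [List.foldl_map]

theorem pv_edges_eq (soln : List String) (stations : List (String × List (String × String))) :
    pvEdges soln stations = (soln.zip soln.tail).map (fun p => (p.1, pvLookD stations p.1 p.2)) := by
  unfold pvEdges
  rw [PySem.List.slice_from soln (by norm_num)]
  norm_num [List.drop_one]

theorem pv_foldE (es : List (String × String)) (p L : String) :
    (es.foldl pvStepE (p, some L)).1 = p ++ pvRenderRest L es := by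
  induction es generalizing p L with
  | nil => simp [pvRenderRest]
  | cons e rest ih =>
    obtain ⟨s, l⟩ := e
    rw [List.foldl_cons]
    by_cases h : l = L
    · subst h
      have hs : pvStepE (p, some l) (s, l) = (p ++ " --> " ++ s, some l) := by
        simp [pvStepE]
      rw [hs, ih]
      simp [pvRenderRest, String.append_assoc]
    · have hs : pvStepE (p, some L) (s, l)
          = (p ++ " --> At " ++ s ++ " transfer from the " ++ L ++ " line to " ++ l ++ " line", some l) := by
        simp [pvStepE, h]
      rw [hs, ih]
      simp [pvRenderRest, h, String.append_assoc]

theorem pv_join_cons (a : String) (L : List String) :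
    PySem.Str.join "" (a :: L) = a ++ PySem.Str.join "" L := by
  apply String.toList_inj.mp
  rw [String.toList_append, PySem.Str.toList_join, PySem.Str.toList_join]
  cases L with
  | nil => simp [PySem.Chars.join_singleton, PySem.Chars.join_nil]
  | cons b M =>
    rw [List.map_cons, List.map_cons, PySem.Chars.join_cons_cons]
    simp

theorem pv_group_cons_pos (s l : String) (ss : List String) (rs : List (String × List String))
    (es : List (String × String)) (hg : pvGroupRuns es = (l, ss) :: rs) :
    pvGroupRuns ((s, l) :: es) = (l, s :: ss) :: rs := by
  rw [show pvGroupRuns ((s, l) :: es) = (match pvGroupRuns es with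
    | [] => [(l, [s])]
    | (l', ss) :: rs => if l = l' then (l, s :: ss) :: rs else (l, [s]) :: (l', ss) :: rs) from rfl, hg]
  simp

theorem pv_group_cons_neg (s l l' : String) (ss : List String) (rs : List (String × List String))
    (es : List (String × String)) (hl : l ≠ l') (hg : pvGroupRuns es = (l', ss) :: rs) :
    pvGroupRuns ((s, l) :: es) = (l, [s]) :: (l', ss) :: rs := by
  rw [show pvGroupRuns ((s, l) :: es) = (match pvGroupRuns es with
    | [] => [(l, [s])]
    | (l', ss) :: rs => if l = l' then (l, s :: ss) :: rs else (l, [s]) :: (l', ss) :: rs) from rfl, hg]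
  simp [hl]

theorem pv_group_shape (s l : String) (es : List (String × String)) :
    ∃ t rs, pvGroupRuns ((s, l) :: es) = (l, s :: t) :: rs := by
  show ∃ t rs, (match pvGroupRuns es with
    | [] => [(l, [s])]
    | (l', ss) :: rs => if l = l' then (l, s :: ss) :: rs else (l, [s]) :: (l', ss) :: rs) = (l, s :: t) :: rs
  cases h : pvGroupRuns es with
  | nil => exact ⟨[], [], rfl⟩
  | cons r rs =>
    obtain ⟨l', ss⟩ := r
    by_cases hl : l = l'
    · exact ⟨ss, rs, by simp [hl]⟩
    · exact ⟨[], (l', ss) :: rs, by simp [hl]⟩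

theorem pv_core (es : List (String × String)) (s l : String) :
    PySem.Str.join "" (pvParts (pvGroupRuns ((s, l) :: es)))
      = "Start on the line " ++ l ++ " --> " ++ s ++ pvRenderRest l es := by
  induction es generalizing s l with
  | nil =>
    show PySem.Str.join "" (pvParts [(l, [s])]) = _
    rw [show pvParts [(l, [s])] = ["Start on the line " ++ l ++ " --> " ++ s] from rfl]
    rw [pv_join_cons]
    simp [PySem.Str.join, PySem.Chars.join_nil, pvRenderRest]
  | cons e rest ih =>
    obtain ⟨s', l'⟩ := e
    obtain ⟨t, rs, hg⟩ := pv_group_shape s' l' rest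
    have ihe := ih s' l'
    rw [hg] at ihe
    have hparts : pvParts ((l', s' :: t) :: rs)
        = ("Start on the line " ++ l' ++ " --> " ++ s') :: (t.map pvCont ++ pvRenderRuns l' rs) := rfl
    rw [hparts, pv_join_cons] at ihe
    have hX : PySem.Str.join "" (t.map pvCont ++ pvRenderRuns l' rs) = pvRenderRest l' rest := by
      have h := ihe
      rw [String.append_assoc, String.append_assoc, String.append_assoc] at h
      rw [String.append_assoc, String.append_assoc, String.append_assoc] at h
      exact (String.append_right_inj _).mp ((String.append_right_inj _).mp
        ((String.append_right_inj _).mp ((String.append_right_inj _).mp h)))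
    by_cases hl : l = l'
    · subst hl
      rw [pv_group_cons_pos s l (s' :: t) rs _ hg]
      have hp2 : pvParts ((l, s :: s' :: t) :: rs)
          = ("Start on the line " ++ l ++ " --> " ++ s)
              :: (pvCont s' :: (t.map pvCont ++ pvRenderRuns l rs)) := rfl
      rw [hp2, pv_join_cons, pv_join_cons, hX]
      have hr : pvRenderRest l ((s', l) :: rest) = (" --> " ++ s') ++ pvRenderRest l rest := by
        simp [pvRenderRest]
      rw [hr]
      simp [pvCont, String.append_assoc]
    · rw [pv_group_cons_neg s l l' (s' :: t) rs _ hl hg]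
      have hp2 : pvParts ((l, [s]) :: (l', s' :: t) :: rs)
          = ("Start on the line " ++ l ++ " --> " ++ s)
              :: ((" --> At " ++ s' ++ " transfer from the " ++ l ++ " line to " ++ l' ++ " line")
                  :: (t.map pvCont ++ pvRenderRuns l' rs)) := rfl
      rw [hp2, pv_join_cons, pv_join_cons, hX]
      have hr : pvRenderRest l ((s', l') :: rest)
          = (" --> At " ++ s' ++ " transfer from the " ++ l ++ " line to " ++ l' ++ " line")
              ++ pvRenderRest l' rest := by
        simp [pvRenderRest, Ne.symm hl]
      rw [hr]

-- ===== VERDICT (by name: the statement is the Claim_ definition above) =====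
theorem form_path_spec : Claim_equal_form_path := by
  intro soln stations _ _
  show form_path soln stations = form_path_alt soln stations
  rw [pv_formA_eq]
  unfold form_path_alt
  rw [pv_edges_eq]
  cases hes : (soln.zip soln.tail).map (fun p => (p.1, pvLookD stations p.1 p.2)) with
  | nil =>
    show ((("", (none : Option String)).1 ++ " --> ") ++ _) = _
    rw [show pvGroupRuns [] = [] from rfl, show pvParts [] = ([] : List String) from rfl]
    simp [PySem.Str.join, PySem.Chars.join_nil]
  | cons e rest =>
    obtain ⟨s, l⟩ := e
    rw [List.foldl_cons]
    show ((rest.foldl pvStepE ("" ++ "Start on the line " ++ l ++ " --> " ++ s, some l)).1 ++ " --> " ++ _) = _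
    rw [pv_foldE, pv_core]
    simp [String.append_assoc]
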